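-- pv_equiv track=rewrite | github.com/zxcalc/pyzx | pyzx/tensor.py | pop_and_shift
-- ===== SOURCE A (Python) =====
-- def pop_and_shift(verts, indices):
--     res = [indices[v].pop() for v in verts if v in indices]
--     for i in sorted(res,reverse=True):
--         for w,l in indices.items():
--             l2 = []
--             for j in l:
--                 if j>i: l2.append(j-1)
--                 else: l2.append(j)
--             indices[w] = l2
--     return res
-- ===== SOURCE B (Python) =====
-- def pop_and_shift(verts, indices):
--     # Phase 1 (read-only): for each listed vertex, record how many of its
--     # indices are consumed and collect the consumed values from the tail.
--     taken = {}
--     res = []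
--     for v in verts:
--         if v in indices:
--             t = taken.get(v, 0) + 1
--             taken[v] = t
--             res.append(indices[v][-t])
--     # Phase 2: truncate each touched list once.
--     for v, t in taken.items():
--         del indices[v][-t:]
--     # Phase 3: renumber every surviving index by its rank among the removed
--     # values (binary search on the sorted removed values).
--     removed = sorted(res)
--     for w, l in indices.items():
--         indices[w] = [j - _rank_below(removed, j) for j in l]
--     return res
--
-- def _rank_below(xs, j):
--     """Number of elements of the sorted list xs strictly below j."""
--     lo, hi = 0, len(xs)
--     while lo < hi:
--         mid = (lo + hi) // 2
--         if xs[mid] < j: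
--             lo = mid + 1
--         else:
--             hi = mid
--     return lo
-- ===== Notes on version B (the rewrite author's own statement) =====
-- stated objective: faster
-- what changed: B never mutates while reading: it counts per-vertex hits once and reads the popped values from the tail by offset (instead of A's repeated .pop()), then renumbers every surviving index in one pass with a binary search over the sorted removed values instead of A's full sweep of all lists per removed value; the proved equivalence is about the return value (both functions also mutate `indices` in place, and their renumbering of it can differ when popped values collide).
import Mathlib
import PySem

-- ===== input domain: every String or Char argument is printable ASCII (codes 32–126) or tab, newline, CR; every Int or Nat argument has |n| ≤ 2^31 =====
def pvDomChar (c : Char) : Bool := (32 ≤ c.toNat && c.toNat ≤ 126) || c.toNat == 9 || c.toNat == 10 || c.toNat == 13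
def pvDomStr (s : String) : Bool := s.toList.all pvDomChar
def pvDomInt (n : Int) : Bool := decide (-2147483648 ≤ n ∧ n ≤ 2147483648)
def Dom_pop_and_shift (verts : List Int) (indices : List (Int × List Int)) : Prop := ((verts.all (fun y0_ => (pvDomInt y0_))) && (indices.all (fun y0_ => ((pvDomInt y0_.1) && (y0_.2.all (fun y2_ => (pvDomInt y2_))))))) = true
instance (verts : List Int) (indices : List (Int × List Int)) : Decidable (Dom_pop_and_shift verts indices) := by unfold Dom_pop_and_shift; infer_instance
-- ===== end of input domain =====

-- B replaces A's pop-while-reading and its per-removed-value sweep over all lists by a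
-- counting pass plus a binary-search renumbering (faster). Both Pythons mutate `indices`
-- in place; the equivalence proved here is about the RETURN value only (the two in-place
-- renumberings of `indices` can differ when popped values collide).

-- ===== PORT A =====
-- res = [indices[v].pop() for v in verts if v in indices]
def pvPopLoop : List Int → PySem.Dict Int (List Int) → List Int
  | [], _ => []
  | v :: vs, d =>
    match PySem.Dict.get? d v with
    | none => pvPopLoop vs d
    | some l =>
      match PySem.List.pop? l with
      | none => pvPopLoop vs d   -- Python raises IndexError here (pop from empty list); outside Pre_
      | some (x, rest) => x :: pvPopLoop vs (PySem.Dict.insert d v rest)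

-- A's subsequent `for i in sorted(res, reverse=True): …` loop only rewrites `indices`
-- in place and never touches `res`; the returned value is `res`.
def pop_and_shift (verts : List Int) (indices : List (Int × List Int)) : List Int :=
  pvPopLoop verts (PySem.Dict.mk indices)

-- ===== PORT B =====
-- first loop of Source B: running per-vertex hit count `taken`, read indices[v][-t]
def pvTakeStep (indices : List (Int × List Int)) (st : PySem.Dict Int Int × List Int)
    (v : Int) : PySem.Dict Int Int × List Int :=
  match PySem.Dict.get? (PySem.Dict.mk indices) v with
  | none => st
  | some l =>
    let t := PySem.Dict.getD st.1 v 0 + 1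
    (PySem.Dict.insert st.1 v t, st.2 ++ [(PySem.List.pyGet? l (-t)).getD 0])

-- Source B's truncation and binary-search renumbering phases only rewrite `indices`
-- in place; the returned value is `res`, built by the first loop.
def pop_and_shift_alt (verts : List Int) (indices : List (Int × List Int)) : List Int :=
  (verts.foldl (pvTakeStep indices) (PySem.Dict.empty, [])).2

-- ===== PRECONDITION & SPEC =====
-- Pre_ excludes exactly the inputs on which A's `.pop()` (and B's `indices[v][-t]`)
-- raises IndexError: some vertex occurs in `verts` more often than its list is long.
def Pre_pop_and_shift (verts : List Int) (indices : List (Int × List Int)) : Prop :=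
  ∀ v ∈ verts, ∀ l ∈ (PySem.Dict.mk indices).get? v, verts.count v ≤ l.length
instance (verts : List Int) (indices : List (Int × List Int)) : Decidable (Pre_pop_and_shift verts indices) := by unfold Pre_pop_and_shift; infer_instance

def pvWitness_pop_and_shift : List Int × (List (Int × List Int)) := ([0, 2], [(0, [5, 7]), (1, [3])])

def Spec_pop_and_shift (verts : List Int) (indices : List (Int × List Int)) (out : List Int) : Prop := out = pop_and_shift_alt verts indices
instance (verts : List Int) (indices : List (Int × List Int)) (out : List Int) : Decidable (Spec_pop_and_shift verts indices out) := by unfold Spec_pop_and_shift; infer_instance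

-- ===== CLAIM (what is proved, stated in full; the proofs are below) =====
def Claim_equal_pop_and_shift : Prop := ∀ (verts : List Int) (indices : List (Int × List Int)), Dom_pop_and_shift verts indices → Pre_pop_and_shift verts indices → Spec_pop_and_shift verts indices (pop_and_shift verts indices)

-- ===== LEMMAS AND PROOFS =====

-- Loop invariant: A's mutated dict `d` holds, at each key, the original list with the
-- `taken`-count last elements removed; then both loops emit the same element and
-- re-establish the invariant.
lemma pv_main (indices : List (Int × List Int)) (vs : List Int)
    (d : PySem.Dict Int (List Int)) (taken : PySem.Dict Int Int) (res : List Int)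
    (hinv : ∀ v, d.get? v = ((PySem.Dict.mk indices).get? v).map
        (fun l => l.take (l.length - (taken.getD v 0).toNat)))
    (hnn : ∀ v, 0 ≤ taken.getD v 0)
    (hpre : ∀ v ∈ vs, ∀ l ∈ (PySem.Dict.mk indices).get? v,
        (taken.getD v 0).toNat + vs.count v ≤ l.length) :
    res ++ pvPopLoop vs d = (vs.foldl (pvTakeStep indices) (taken, res)).2 := by
  induction vs generalizing d taken res with
  | nil => simp [pvPopLoop]
  | cons v vs ih =>
    cases horig : (PySem.Dict.mk indices).get? v with
    | none =>
      have hd : d.get? v = none := by rw [hinv v, horig]; rfl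
      rw [List.foldl_cons]
      simp only [pvPopLoop, pvTakeStep, hd, horig]
      refine ih d taken res hinv hnn ?_
      intro w hw l hl
      have := hpre w (List.mem_cons_of_mem _ hw) l hl
      have hc : vs.count w ≤ (v :: vs).count w := by
        rw [List.count_cons]; omega
      omega
    | some L =>
      have htnn : 0 ≤ taken.getD v 0 := hnn v
      set t : Nat := (taken.getD v 0).toNat with ht
      have hd : d.get? v = some (L.take (L.length - t)) := by rw [hinv v, horig]; rfl
      have hlen : t + (v :: vs).count v ≤ L.length :=
        hpre v List.mem_cons_self L (by rw [horig]; exact rfl)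
      have hcount1 : 1 ≤ (v :: vs).count v := by
        rw [List.count_cons]; simp
      have htlt : t + 1 ≤ L.length := by omega
      obtain ⟨n, hn⟩ : ∃ n, L.length - t = n + 1 := ⟨L.length - t - 1, by omega⟩
      have hidx : n < L.length := by omega
      have hsplit : L.take (L.length - t) = L.take n ++ [L[n]] := by
        rw [hn, List.take_add_one, List.getElem?_eq_getElem hidx]
        simp
      have hpop : PySem.List.pop? (L.take (L.length - t)) = some (L[n], L.take n) := by
        rw [hsplit]; exact PySem.List.pop?_last _ _
      have hcast : taken.getD v 0 + 1 = ((t + 1 : Nat) : Int) := by omega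
      have hget : PySem.List.pyGet? L (-(taken.getD v 0 + 1)) = some L[n] := by
        rw [hcast, PySem.List.pyGet?_neg_natCast L (t + 1) (by omega) htlt]
        have hln : L.length - (t + 1) = n := by omega
        rw [hln, List.getElem?_eq_getElem hidx]
      rw [List.foldl_cons]
      simp only [pvPopLoop, pvTakeStep, hd, horig, hpop, hget]
      have hstep : res ++ L[n] :: pvPopLoop vs (PySem.Dict.insert d v (L.take n))
          = (res ++ [L[n]]) ++ pvPopLoop vs (PySem.Dict.insert d v (L.take n)) := by
        simp
      rw [hstep]
      refine ih _ _ _ ?_ ?_ ?_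
      · intro w
        by_cases hw : w = v
        · subst hw
          rw [PySem.Dict.get?_insert_self, PySem.Dict.getD_insert_self, horig]
          have h1 : (taken.getD w 0 + 1).toNat = t + 1 := by omega
          have h2 : L.length - (t + 1) = n := by omega
          rw [Option.map_some, h1, h2]
        · rw [PySem.Dict.get?_insert_of_ne (hne := hw), PySem.Dict.getD_insert_of_ne (hne := hw)]
          exact hinv w
      · intro w
        by_cases hw : w = v
        · subst hw; rw [PySem.Dict.getD_insert_self]; omega
        · rw [PySem.Dict.getD_insert_of_ne (hne := hw)]; exact hnn w
      · intro w hw l hl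
        by_cases hwv : w = v
        · subst hwv
          rw [horig] at hl
          have hlL : l = L := by cases hl; rfl
          subst hlL
          rw [PySem.Dict.getD_insert_self]
          have h1 : (taken.getD w 0 + 1).toNat = t + 1 := by omega
          have hcv : (w :: vs).count w = vs.count w + 1 := by
            rw [List.count_cons]; simp
          omega
        · rw [PySem.Dict.getD_insert_of_ne (hne := hwv)]
          have := hpre w (List.mem_cons_of_mem _ hw) l hl
          have hc : vs.count w ≤ (v :: vs).count w := by
            rw [List.count_cons]; omega
          omega

-- ===== VERDICT (by name: the statement is the Claim_ definition above) =====
theorem pop_and_shift_spec : Claim_equal_pop_and_shift := by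
  intro verts indices _dom hpre
  unfold Spec_pop_and_shift pop_and_shift pop_and_shift_alt
  have h := pv_main indices verts (PySem.Dict.mk indices) PySem.Dict.empty []
    (by
      intro v
      cases h : (PySem.Dict.mk indices).get? v with
      | none => rfl
      | some l => simp [PySem.Dict.getD_empty, List.take_length])
    (by intro v; simp [PySem.Dict.getD_empty])
    (by
      intro v hv l hl
      have := hpre v hv l hl
      simp only [PySem.Dict.getD_empty, Int.toNat_zero]
      omega)
  simpa using h
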